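-- pv_equiv track=rewrite | github.com/ohjiae/Algorithm_Study_2022 | stack_queue/europani/Programmers-프린터.py | solution
-- ===== SOURCE A (Python) =====
-- from collections import deque
--
-- def solution(priorities, location):
--     cnt = 0
--     queue = deque()
--     for i, v in enumerate(priorities):
--         queue.append((i, v))
--
--     while queue:
--         max_value = max(queue, key=lambda x:x[1])[1]
--         idx, value = queue.popleft()
--
--         if value==max_value:
--             cnt+=1
--             if idx == location:
--                 break
--         else:
--             queue.append((idx, value))
--
--     return cnt
-- ===== SOURCE B (Python) =====
-- def solution(priorities, location):
--     # Select-and-splice: instead of rotating one item at a time, jump straight to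
--     # the first remaining item holding the maximum priority and cut the list there.
--     items = list(enumerate(priorities))
--     cnt = 0
--     while items:
--         m = max(v for _, v in items)
--         k = next(i for i, y in enumerate(items) if y[1] == m)
--         cnt += 1
--         if items[k][0] == location:
--             return cnt
--         items = items[k + 1:] + items[:k]
--     return cnt
-- ===== Notes on version B (the rewrite author's own statement) =====
-- stated objective: faster
-- what changed: Instead of rotating the deque one element at a time and rescanning the whole queue for the max on every single rotation, B jumps directly to the first remaining item that holds the maximum priority and splices the list there, doing O(n) work per printed item.
import Mathlib
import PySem

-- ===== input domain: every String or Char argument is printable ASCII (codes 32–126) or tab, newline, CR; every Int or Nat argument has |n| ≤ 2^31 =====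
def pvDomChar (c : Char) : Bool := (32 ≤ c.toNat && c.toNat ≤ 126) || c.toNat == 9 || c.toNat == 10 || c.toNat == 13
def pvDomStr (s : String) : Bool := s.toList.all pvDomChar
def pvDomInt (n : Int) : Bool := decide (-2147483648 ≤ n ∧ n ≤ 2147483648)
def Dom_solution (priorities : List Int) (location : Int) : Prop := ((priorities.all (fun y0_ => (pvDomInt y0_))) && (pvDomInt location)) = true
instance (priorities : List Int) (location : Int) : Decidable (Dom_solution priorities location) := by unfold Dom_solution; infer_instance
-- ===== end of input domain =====

-- B replaces A's one-rotation-at-a-time deque simulation (max rescanned on every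
-- rotation) by jumping directly to the first remaining maximum-priority item and
-- splicing the list there, one splice per printed item; measurably faster.

-- ===== PORT A =====
-- termination helper for the rotation branch: the first maximal element moves one
-- step closer to the front (cited by name in solutionLoop's decreasing_by)
theorem pvMaxSome (q : List (Int × Int)) (hq : q ≠ []) :
    ∃ mx, PySem.List.max? q (fun x => x.2) = some mx := by
  cases h : PySem.List.max? q (fun x => x.2) with
  | none => exact absurd ((PySem.List.max?_eq_none_iff _ _).mp h) hq
  | some mx => exact ⟨mx, rfl⟩

theorem pvRotMeasure_lt (x : Int × Int) (rest : List (Int × Int))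
    (hmem : ∃ y ∈ rest, ((x :: rest).all (fun z => decide (z.2 ≤ y.2))) = true)
    (hx : ((x :: rest).all (fun z => decide (z.2 ≤ x.2))) = false) :
    List.findIdx (fun y => (rest ++ [x]).all (fun z => decide (z.2 ≤ y.2))) (rest ++ [x])
      < List.findIdx (fun y => ((x :: rest)).all (fun z => decide (z.2 ≤ y.2))) (x :: rest) := by
  have hpeq : (fun (y : Int × Int) => (rest ++ [x]).all (fun z => decide (z.2 ≤ y.2)))
      = (fun (y : Int × Int) => ((x :: rest)).all (fun z => decide (z.2 ≤ y.2))) := by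
    funext y
    simp only [List.all_append, List.all_cons, List.all_nil, Bool.and_true]
    exact Bool.and_comm _ _
  rw [hpeq]
  set p : Int × Int → Bool := fun y => ((x :: rest)).all (fun z => decide (z.2 ≤ y.2)) with hp
  have hlt : List.findIdx p rest < rest.length := by
    rw [List.findIdx_lt_length]
    obtain ⟨y, hy, hpy⟩ := hmem
    exact ⟨y, hy, hpy⟩
  rw [List.findIdx_append, if_pos hlt, List.findIdx_cons]
  have hpx : p x = false := hx
  rw [hpx]
  simp

def solutionLoop (location : Int) : List (Int × Int) → Int → Int
  | [], cnt => cnt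
  | (idx, value) :: rest, cnt =>
    -- max_value = max(queue, key=lambda x: x[1])[1]; the queue is nonempty here, so
    -- Python's max cannot raise and the getD default is never used
    let max_value : Int := ((PySem.List.max? ((idx, value) :: rest) (fun x => x.2)).getD (idx, value)).2
    if value = max_value then
      if idx = location then cnt + 1 else solutionLoop location rest (cnt + 1)
    else solutionLoop location (rest ++ [(idx, value)]) cnt
termination_by q _ => (q.length, List.findIdx (fun y => q.all (fun z => decide (z.2 ≤ y.2))) q)
decreasing_by
  · exact Prod.Lex.left _ _ (by simp only [List.length_cons]; omega)
  · rw [show (rest ++ [(idx, value)]).length = ((idx, value) :: rest).length by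
      simp only [List.length_append, List.length_cons, List.length_nil]]
    refine Prod.Lex.right _ ?_
    apply pvRotMeasure_lt
    · rename_i hne
      obtain ⟨mx, hmx⟩ := pvMaxSome ((idx, value) :: rest) (by simp)
      have hub := PySem.List.max?_isMax hmx
      have hvne : value ≠ mx.2 := by
        intro h
        apply hne
        show value = ((PySem.List.max? ((idx, value) :: rest) (fun x => x.2)).getD (idx, value)).2
        rw [hmx]
        exact h
      have hmx_in_rest : mx ∈ rest := by
        rcases List.mem_cons.mp (PySem.List.max?_mem hmx) with h | h
        · exact absurd (congrArg Prod.snd h.symm) hvne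
        · exact h
      refine ⟨mx, hmx_in_rest, ?_⟩
      simp only [List.all_eq_true, decide_eq_true_eq]
      exact fun z hz => hub z hz
    · rename_i hne
      obtain ⟨mx, hmx⟩ := pvMaxSome ((idx, value) :: rest) (by simp)
      have hub := PySem.List.max?_isMax hmx
      have hvne : value ≠ mx.2 := by
        intro h
        apply hne
        show value = ((PySem.List.max? ((idx, value) :: rest) (fun x => x.2)).getD (idx, value)).2
        rw [hmx]
        exact h
      rw [List.all_eq_false]
      refine ⟨mx, PySem.List.max?_mem hmx, ?_⟩
      rw [Bool.not_eq_true, decide_eq_false_iff_not]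
      exact not_le_of_gt (lt_of_le_of_ne (hub (idx, value) (by simp)) hvne)

def solution (priorities : List Int) (location : Int) : Int :=
  solutionLoop location (PySem.List.enumerate priorities) 0

-- ===== PORT B =====
-- m = max(v for _, v in items): Python's running max over the second components
def pyMaxSnd (x : Int × Int) (rest : List (Int × Int)) : Int :=
  rest.foldl (fun a y => max a y.2) x.2

-- termination helper: the first maximal element exists, so findIdx is in range
-- (cited by name in solutionAltLoop's decreasing_by)
theorem pvAltFindIdx_lt (x : Int × Int) (rest : List (Int × Int)) :
    List.findIdx (fun y => y.2 == pyMaxSnd x rest) (x :: rest)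
      < (x :: rest).length := by
  unfold pyMaxSnd
  rw [List.findIdx_lt_length]
  have hmem : ∀ (l : List (Int × Int)) (a : Int),
      l.foldl (fun acc z => max acc z.2) a = a ∨ ∃ y ∈ l, y.2 = l.foldl (fun acc z => max acc z.2) a := by
    intro l
    induction l with
    | nil => intro a; exact Or.inl rfl
    | cons z t ih =>
      intro a
      rcases ih (max a z.2) with h | h
      · rcases max_choice a z.2 with hm | hm
        · exact Or.inl (by simpa [hm] using h)
        · exact Or.inr ⟨z, by simp, by simpa [hm] using h.symm⟩
      · obtain ⟨y, hy, hyv⟩ := h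
        exact Or.inr ⟨y, by simp [hy], by simpa using hyv⟩
  rcases hmem rest x.2 with h | h
  · exact ⟨x, by simp, by simpa using h.symm⟩
  · obtain ⟨y, hy, hyv⟩ := h
    exact ⟨y, by simp [hy], by simpa using hyv⟩

def solutionAltLoop (location : Int) : List (Int × Int) → Int → Int
  | [], cnt => cnt
  | x :: rest, cnt =>
    -- m = max(v for _, v in items) as Python's running max
    let m : Int := pyMaxSnd x rest
    -- k = next(i for i, y in enumerate(items) if y[1] == m)
    let k : Nat := List.findIdx (fun y => y.2 == m) (x :: rest)
    -- items[k][0]: k is in range, so the getD default is never used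
    if ((x :: rest).getD k (0, 0)).1 = location then cnt + 1
    else solutionAltLoop location ((x :: rest).drop (k + 1) ++ (x :: rest).take k) (cnt + 1)
termination_by q _ => q.length
decreasing_by
  simp only [List.length_append, List.length_drop, List.length_take, List.length_cons]
  have hk := pvAltFindIdx_lt x rest
  simp only [List.length_cons] at hk
  omega

def solution_alt (priorities : List Int) (location : Int) : Int :=
  solutionAltLoop location (PySem.List.enumerate priorities) 0

-- ===== PRECONDITION & SPEC =====
def Spec_solution (priorities : List Int) (location : Int) (out : Int) : Prop := out = solution_alt priorities location
instance (priorities : List Int) (location : Int) (out : Int) : Decidable (Spec_solution priorities location out) := by unfold Spec_solution; infer_instance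

-- ===== CLAIM (what is proved, stated in full; the proofs are below) =====
def Claim_equal_solution : Prop := ∀ (priorities : List Int) (location : Int), Dom_solution priorities location → Spec_solution priorities location (solution priorities location)

-- ===== LEMMAS AND PROOFS =====

-- A's max(queue, key)[1] equals any value M that is an attained upper bound
theorem pvPyMax_eq (q : List (Int × Int)) (d : Int × Int) (M : Int)
    (hub : ∀ z ∈ q, z.2 ≤ M) (hmem : ∃ z ∈ q, z.2 = M) :
    ((PySem.List.max? q (fun x => x.2)).getD d).2 = M := by
  obtain ⟨z, hz, hzM⟩ := hmem
  obtain ⟨mx, hmx⟩ : ∃ mx, PySem.List.max? q (fun x => x.2) = some mx := by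
    cases h : PySem.List.max? q (fun x => x.2) with
    | none =>
      exact absurd ((PySem.List.max?_eq_none_iff _ _).mp h) (by rintro rfl; exact absurd hz (by simp))
    | some mx => exact ⟨mx, rfl⟩
  rw [hmx]
  exact le_antisymm (hub _ (PySem.List.max?_mem hmx)) (hzM ▸ PySem.List.max?_isMax hmx z hz)

-- rotating the sub-maximal prefix to the back does not change A's loop
theorem pvRotA (loc M : Int) : ∀ (a : List (Int × Int)) (x : Int × Int) (b : List (Int × Int)) (cnt : Int),
    (∀ z ∈ a ++ x :: b, z.2 ≤ M) → (∃ z ∈ a ++ x :: b, z.2 = M) → (∀ y ∈ a, y.2 ≠ M) →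
    solutionLoop loc (a ++ x :: b) cnt = solutionLoop loc (x :: (b ++ a)) cnt := by
  intro a
  induction a with
  | nil => intro x b cnt _ _ _; simp
  | cons y a' ih =>
    intro x b cnt hub hmem ha
    obtain ⟨y1, y2⟩ := y
    have hcons : (y1, y2) :: a' ++ x :: b = (y1, y2) :: (a' ++ x :: b) := by simp
    rw [hcons, solutionLoop]
    have hmax : ((PySem.List.max? ((y1, y2) :: (a' ++ x :: b)) (fun x => x.2)).getD (y1, y2)).2 = M := by
      apply pvPyMax_eq
      · simpa using hub
      · simpa using hmem
    rw [hmax, if_neg (ha (y1, y2) (by simp))]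
    have hlist : (a' ++ x :: b) ++ [(y1, y2)] = a' ++ x :: (b ++ [(y1, y2)]) := by simp
    rw [hlist, ih x (b ++ [(y1, y2)]) cnt]
    · simp
    · intro z hz; apply hub; simp at hz ⊢; tauto
    · obtain ⟨z, hz, hzM⟩ := hmem
      refine ⟨z, ?_, hzM⟩
      simp at hz ⊢
      rcases hz with h | h | h
      · subst h
        exact absurd hzM (ha (y1, y2) (by simp))
      · tauto
      · tauto
    · intro z hz; exact ha z (by simp [hz])

theorem pvLoopEq (loc : Int) : ∀ (n : Nat) (q : List (Int × Int)) (cnt : Int), q.length ≤ n →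
    solutionLoop loc q cnt = solutionAltLoop loc q cnt := by
  intro n
  induction n with
  | zero =>
    intro q cnt h
    have hq : q = [] := List.length_eq_zero_iff.mp (Nat.le_zero.mp h)
    subst hq
    rw [solutionLoop, solutionAltLoop]
  | succ n ih =>
    intro q cnt hlen
    cases q with
    | nil => rw [solutionLoop, solutionAltLoop]
    | cons x rest =>
      have hub : ∀ z ∈ x :: rest, z.2 ≤ pyMaxSnd x rest := by
        intro z hz
        rcases List.mem_cons.mp hz with h | h
        · rw [h]; exact (PySem.List.le_foldl_max_int rest (fun y => y.2) x.2).1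
        · exact (PySem.List.le_foldl_max_int rest (fun y => y.2) x.2).2 z h
      have hk := pvAltFindIdx_lt x rest
      obtain ⟨x1, x2, hxq⟩ : ∃ a b, (x :: rest)[List.findIdx (fun y => y.2 == pyMaxSnd x rest) (x :: rest)]'hk = (a, b) :=
        ⟨_, _, rfl⟩
      have hx2 : x2 = pyMaxSnd x rest := by
        have h := @List.findIdx_getElem _ (fun y => y.2 == pyMaxSnd x rest) (x :: rest) hk
        rw [hxq] at h
        simpa using h
      have hsplit : (x :: rest).take (List.findIdx (fun y => y.2 == pyMaxSnd x rest) (x :: rest))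
          ++ (x1, x2) :: (x :: rest).drop (List.findIdx (fun y => y.2 == pyMaxSnd x rest) (x :: rest) + 1)
          = x :: rest := by
        rw [← hxq, List.getElem_cons_drop hk, List.take_append_drop]
      have hta : ∀ y ∈ (x :: rest).take (List.findIdx (fun y => y.2 == pyMaxSnd x rest) (x :: rest)), y.2 ≠ pyMaxSnd x rest := by
        intro y hy
        obtain ⟨i, hi, hiy⟩ := List.mem_iff_getElem.mp hy
        have hik : i < List.findIdx (fun y => y.2 == pyMaxSnd x rest) (x :: rest) := by
          have := hi
          simp only [List.length_take] at this
          omega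
        have hfalse := List.not_of_lt_findIdx (p := fun y => y.2 == pyMaxSnd x rest) (xs := x :: rest) hik
        rw [← hiy, List.getElem_take]
        simpa using hfalse
      have hmemrot : ∀ z ∈ (x1, x2) :: ((x :: rest).drop (List.findIdx (fun y => y.2 == pyMaxSnd x rest) (x :: rest) + 1)
          ++ (x :: rest).take (List.findIdx (fun y => y.2 == pyMaxSnd x rest) (x :: rest))), z ∈ x :: rest := by
        intro z hz
        rcases List.mem_cons.mp hz with h | h
        · rw [h, ← hsplit]; simp
        · rcases List.mem_append.mp h with h' | h'
          · exact List.mem_of_mem_drop h'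
          · exact List.mem_of_mem_take h'
      have hA : solutionLoop loc (x :: rest) cnt =
          if x1 = loc then cnt + 1
          else solutionLoop loc ((x :: rest).drop (List.findIdx (fun y => y.2 == pyMaxSnd x rest) (x :: rest) + 1)
            ++ (x :: rest).take (List.findIdx (fun y => y.2 == pyMaxSnd x rest) (x :: rest))) (cnt + 1) := by
        conv_lhs => rw [← hsplit]
        rw [pvRotA loc (pyMaxSnd x rest) _ (x1, x2) _ cnt
          (by rw [hsplit]; exact hub)
          (by rw [hsplit]; exact ⟨(x1, x2), by rw [← hsplit]; simp, hx2⟩)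
          hta]
        rw [solutionLoop]
        have hmax : ((PySem.List.max? ((x1, x2) :: ((x :: rest).drop (List.findIdx (fun y => y.2 == pyMaxSnd x rest) (x :: rest) + 1)
            ++ (x :: rest).take (List.findIdx (fun y => y.2 == pyMaxSnd x rest) (x :: rest)))) (fun x => x.2)).getD (x1, x2)).2
            = pyMaxSnd x rest := by
          apply pvPyMax_eq
          · exact fun z hz => hub z (hmemrot z hz)
          · exact ⟨(x1, x2), by simp, hx2⟩
        rw [hmax, if_pos hx2]
      have hB : solutionAltLoop loc (x :: rest) cnt =
          if x1 = loc then cnt + 1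
          else solutionAltLoop loc ((x :: rest).drop (List.findIdx (fun y => y.2 == pyMaxSnd x rest) (x :: rest) + 1)
            ++ (x :: rest).take (List.findIdx (fun y => y.2 == pyMaxSnd x rest) (x :: rest))) (cnt + 1) := by
        rw [solutionAltLoop]
        rw [List.getD_eq_getElem _ _ hk, hxq]
      rw [hA, hB]
      split
      · rfl
      · apply ih
        have hk' : List.findIdx (fun y => y.2 == pyMaxSnd x rest) (x :: rest) < rest.length + 1 := by
          simpa using hk
        simp only [List.length_append, List.length_drop, List.length_take, List.length_cons] at hlen ⊢
        omega

-- ===== VERDICT (by name: the statement is the Claim_ definition above) =====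
theorem solution_spec : Claim_equal_solution := by
  intro priorities location _
  unfold Spec_solution solution solution_alt
  exact pvLoopEq location _ _ 0 le_rfl
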